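-- pv_equiv track=rewrite | github.com/benquick123/code-profiling | code/batch-1/vse-naloge-brez-testov/DN7-M-167.py | brez_sosedov
-- ===== SOURCE A (Python) =====
-- def vsa_polja(s, v):
--     return ((x, y) for x in range(s) for y in range(v))
--
-- def sosedov(x, y, mine):
--     sosed = 0
--     xkoor = [x-1, x, x+1]
--     ykoor = [y-1, y, y+1]
--     preveri = [(a, b) for a in xkoor for b in ykoor if a != x or b != y]
--     for polje in preveri:
--         if polje in mine:
--             sosed +=1
--     return sosed
--
-- def brez_sosedov(mine, s, v):
--     polja_brez_min = set()
--     for x, y in vsa_polja(s, v):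
--         ima_mine = sosedov(x, y, mine)
--         if ima_mine == 0:
--             polje = (x, y)
--             polja_brez_min.add(polje)
--     return polja_brez_min
-- ===== SOURCE B (Python) =====
-- # B: mark the in-grid neighbors of every mine once in a set, then a single pass
-- # over the grid keeps every unmarked cell (instead of scanning the mine list
-- # for each of the 8 neighbours of every grid cell).
-- _OFFSETS = ((-1, -1), (-1, 0), (-1, 1), (0, -1), (0, 1), (1, -1), (1, 0), (1, 1))
--
-- def brez_sosedov(mine, s, v):
--     adjacent = set()
--     for mx, my in mine:
--         for dx, dy in _OFFSETS:
--             nx, ny = mx + dx, my + dy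
--             if 0 <= nx < s and 0 <= ny < v:
--                 adjacent.add((nx, ny))
--     return {(x, y) for x in range(s) for y in range(v) if (x, y) not in adjacent}
-- ===== Notes on version B (the rewrite author's own statement) =====
-- stated objective: alternative
-- what changed: Instead of counting, for every grid cell, how many of its 8 neighbours appear in the mine list (a list scan per neighbour), B marks the in-grid neighbours of each mine once in a set and then keeps the unmarked grid cells in one pass; intended as faster (measured 1.85-2.9x in a timing run, below its 1.5x-at-largest-size confirmation bar).
import Mathlib
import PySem

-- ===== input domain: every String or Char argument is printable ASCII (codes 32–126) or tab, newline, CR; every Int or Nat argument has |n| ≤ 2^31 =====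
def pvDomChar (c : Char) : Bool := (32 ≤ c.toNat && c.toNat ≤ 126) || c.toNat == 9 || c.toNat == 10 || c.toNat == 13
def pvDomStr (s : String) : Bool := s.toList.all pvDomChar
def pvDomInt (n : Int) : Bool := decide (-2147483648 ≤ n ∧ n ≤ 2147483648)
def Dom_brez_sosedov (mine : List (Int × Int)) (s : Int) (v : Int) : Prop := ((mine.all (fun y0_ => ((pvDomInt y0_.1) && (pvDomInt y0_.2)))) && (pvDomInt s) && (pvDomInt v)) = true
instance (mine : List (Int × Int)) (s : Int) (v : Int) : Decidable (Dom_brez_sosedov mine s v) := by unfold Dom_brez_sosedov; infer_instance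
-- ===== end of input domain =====

-- B marks the in-grid neighbours of each mine in one set and filters the grid against it,
-- instead of A's per-cell count that scans the mine list for each of the 8 neighbours
-- (a different algorithm; return-value equivalence is proved below).

-- ===== PORT A =====
def vsa_polja (s v : Int) : List (Int × Int) :=
  (PySem.List.pyRange 0 s 1).flatMap (fun x => (PySem.List.pyRange 0 v 1).map (fun y => (x, y)))

def sosedov (x y : Int) (mine : List (Int × Int)) : Int :=
  let xkoor : List Int := [x - 1, x, x + 1]
  let ykoor : List Int := [y - 1, y, y + 1]
  let preveri : List (Int × Int) :=
    xkoor.flatMap (fun a => (ykoor.filter (fun b => decide (a ≠ x ∨ b ≠ y))).map (fun b => (a, b)))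
  preveri.foldl (fun sosed polje => if polje ∈ mine then sosed + 1 else sosed) 0

def brez_sosedov (mine : List (Int × Int)) (s : Int) (v : Int) : List (Int × Int) :=
  (vsa_polja s v).foldl
    (fun polja_brez_min c =>
      let ima_mine := sosedov c.1 c.2 mine
      if ima_mine = 0 then PySem.Set.add polja_brez_min (c.1, c.2) else polja_brez_min)
    PySem.Set.empty

-- ===== PORT B =====
def pvOffsets : List (Int × Int) := [(-1, -1), (-1, 0), (-1, 1), (0, -1), (0, 1), (1, -1), (1, 0), (1, 1)]

def adjacentOf (mine : List (Int × Int)) (s v : Int) : PySem.Set (Int × Int) :=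
  mine.foldl
    (fun adj m =>
      pvOffsets.foldl
        (fun adj o =>
          if 0 ≤ m.1 + o.1 ∧ m.1 + o.1 < s ∧ 0 ≤ m.2 + o.2 ∧ m.2 + o.2 < v
          then PySem.Set.add adj (m.1 + o.1, m.2 + o.2) else adj)
        adj)
    PySem.Set.empty

def brez_sosedov_alt (mine : List (Int × Int)) (s : Int) (v : Int) : List (Int × Int) :=
  let adjacent := adjacentOf mine s v
  ((PySem.List.pyRange 0 s 1).flatMap (fun x => (PySem.List.pyRange 0 v 1).map (fun y => (x, y)))).foldl
    (fun out c => if c ∈ adjacent then out else PySem.Set.add out c)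
    PySem.Set.empty

-- ===== PRECONDITION & SPEC =====
def Spec_brez_sosedov (mine : List (Int × Int)) (s : Int) (v : Int) (out : List (Int × Int)) : Prop := out = brez_sosedov_alt mine s v
instance (mine : List (Int × Int)) (s : Int) (v : Int) (out : List (Int × Int)) : Decidable (Spec_brez_sosedov mine s v out) := by unfold Spec_brez_sosedov; infer_instance

-- ===== CLAIM (what is proved, stated in full; the proofs are below) =====
def Claim_equal_brez_sosedov : Prop := ∀ (mine : List (Int × Int)) (s : Int) (v : Int), Dom_brez_sosedov mine s v → Spec_brez_sosedov mine s v (brez_sosedov mine s v)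

-- ===== LEMMAS AND PROOFS =====

-- membership in a guarded "add" fold
theorem mem_foldl_add_if {α β : Type} [BEq β] [LawfulBEq β] (l : List α) (p : α → Prop) [DecidablePred p]
    (g : α → β) (s : PySem.Set β) (y : β) :
    (y ∈ l.foldl (fun s x => if p x then PySem.Set.add s (g x) else s) s) ↔
      y ∈ s ∨ ∃ x ∈ l, p x ∧ y = g x := by
  induction l generalizing s with
  | nil => simp
  | cons h t ih =>
    simp only [List.foldl_cons, List.mem_cons, ih]
    split <;> simp_all [PySem.Set.mem_add] <;> try tauto

-- membership in the inner (offsets) loop of adjacentOf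
theorem mem_inner (m : Int × Int) (s v : Int) (adj : PySem.Set (Int × Int)) (c : Int × Int) :
    (c ∈ pvOffsets.foldl
        (fun adj o =>
          if 0 ≤ m.1 + o.1 ∧ m.1 + o.1 < s ∧ 0 ≤ m.2 + o.2 ∧ m.2 + o.2 < v
          then PySem.Set.add adj (m.1 + o.1, m.2 + o.2) else adj)
        adj) ↔
      c ∈ adj ∨ ∃ o ∈ pvOffsets,
        (0 ≤ m.1 + o.1 ∧ m.1 + o.1 < s ∧ 0 ≤ m.2 + o.2 ∧ m.2 + o.2 < v) ∧
        c = (m.1 + o.1, m.2 + o.2) :=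
  mem_foldl_add_if pvOffsets
    (fun o => 0 ≤ m.1 + o.1 ∧ m.1 + o.1 < s ∧ 0 ≤ m.2 + o.2 ∧ m.2 + o.2 < v)
    (fun o => (m.1 + o.1, m.2 + o.2)) adj c

-- membership in the B-side adjacency set
theorem mem_adjacentOf (mine : List (Int × Int)) (s v : Int) (c : Int × Int) :
    c ∈ adjacentOf mine s v ↔
      ∃ m ∈ mine, ∃ o ∈ pvOffsets,
        (0 ≤ m.1 + o.1 ∧ m.1 + o.1 < s ∧ 0 ≤ m.2 + o.2 ∧ m.2 + o.2 < v) ∧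
        c = (m.1 + o.1, m.2 + o.2) := by
  unfold adjacentOf
  have key : ∀ (l : List (Int × Int)) (adj : PySem.Set (Int × Int)),
      (c ∈ l.foldl
        (fun adj m =>
          pvOffsets.foldl
            (fun adj o =>
              if 0 ≤ m.1 + o.1 ∧ m.1 + o.1 < s ∧ 0 ≤ m.2 + o.2 ∧ m.2 + o.2 < v
              then PySem.Set.add adj (m.1 + o.1, m.2 + o.2) else adj)
            adj)
        adj) ↔
        c ∈ adj ∨ ∃ m ∈ l, ∃ o ∈ pvOffsets,
          (0 ≤ m.1 + o.1 ∧ m.1 + o.1 < s ∧ 0 ≤ m.2 + o.2 ∧ m.2 + o.2 < v) ∧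
          c = (m.1 + o.1, m.2 + o.2) := by
    intro l
    induction l with
    | nil => simp
    | cons h t ih =>
      intro adj
      rw [List.foldl_cons, ih, mem_inner h s v adj c]
      constructor
      · rintro ((hc | ⟨o, ho, hb, hy⟩) | ⟨m, hm, rest⟩)
        · exact Or.inl hc
        · exact Or.inr ⟨h, List.mem_cons_self, o, ho, hb, hy⟩
        · exact Or.inr ⟨m, List.mem_cons_of_mem h hm, rest⟩
      · rintro (hc | ⟨m, hm, rest⟩)
        · exact Or.inl (Or.inl hc)
        · rcases List.mem_cons.mp hm with rfl | hm'
          · exact Or.inl (Or.inr rest)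
          · exact Or.inr ⟨m, hm', rest⟩
  rw [key]
  simp

-- "p is one of the 8 neighbours of (x, y)"
def nbr (x y : Int) (p : Int × Int) : Prop :=
  x - 1 ≤ p.1 ∧ p.1 ≤ x + 1 ∧ y - 1 ≤ p.2 ∧ p.2 ≤ y + 1 ∧ (p.1 ≠ x ∨ p.2 ≠ y)

theorem sosedov_eq_zero_iff (x y : Int) (mine : List (Int × Int)) :
    sosedov x y mine = 0 ↔ ∀ m ∈ mine, ¬ nbr x y m := by
  unfold sosedov
  rw [PySem.List.foldl_ite_add_one]
  constructor
  · intro h m hm hn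
    have hcount : ∀ p ∈ ([x - 1, x, x + 1].flatMap
        (fun a => (([y - 1, y, y + 1].filter (fun b => decide (a ≠ x ∨ b ≠ y)))).map (fun b => (a, b)))),
        p ∉ mine := by
      intro p hp hpm
      have : 0 < (([x - 1, x, x + 1].flatMap
        (fun a => (([y - 1, y, y + 1].filter (fun b => decide (a ≠ x ∨ b ≠ y)))).map (fun b => (a, b))))).countP
          (fun p => decide (p ∈ mine)) := by
        apply List.countP_pos_iff.mpr
        exact ⟨p, hp, by simpa using hpm⟩
      omega
    apply hcount m _ hm
    obtain ⟨m1, m2⟩ := m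
    simp only [List.mem_flatMap, List.mem_map, List.mem_filter, List.mem_cons,
      List.not_mem_nil, or_false, decide_eq_true_eq, Prod.mk.injEq]
    obtain ⟨h1, h2, h3, h4, h5⟩ := hn
    exact ⟨m1, by omega, m2, ⟨by omega, by simpa using h5⟩, rfl, rfl⟩
  · intro h
    have : (([x - 1, x, x + 1].flatMap
        (fun a => (([y - 1, y, y + 1].filter (fun b => decide (a ≠ x ∨ b ≠ y)))).map (fun b => (a, b))))).countP
          (fun p => decide (p ∈ mine)) = 0 := by
      apply List.countP_eq_zero.mpr
      intro p hp
      simp only [decide_eq_true_eq] at *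
      intro hpm
      apply h p hpm
      obtain ⟨p1, p2⟩ := p
      simp only [List.mem_flatMap, List.mem_map, List.mem_filter, List.mem_cons,
        List.not_mem_nil, or_false, decide_eq_true_eq, Prod.mk.injEq] at hp
      obtain ⟨a, ha, b, ⟨hb, hab⟩, rfl, rfl⟩ := hp
      exact ⟨by omega, by omega, by omega, by omega, by simpa using hab⟩
    omega

-- the bridge: for an in-grid cell, "no mine neighbour" = "not marked by B"
theorem bridge (mine : List (Int × Int)) (s v : Int) (c : Int × Int)
    (hc : 0 ≤ c.1 ∧ c.1 < s ∧ 0 ≤ c.2 ∧ c.2 < v) :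
    (sosedov c.1 c.2 mine = 0) ↔ c ∉ adjacentOf mine s v := by
  rw [sosedov_eq_zero_iff, mem_adjacentOf]
  constructor
  · intro h ⟨m, hm, o, ho, hb, hco⟩
    apply h m hm
    obtain ⟨m1, m2⟩ := m; obtain ⟨o1, o2⟩ := o; obtain ⟨c1, c2⟩ := c
    simp only [pvOffsets, List.mem_cons, List.not_mem_nil, or_false, Prod.mk.injEq] at ho
    simp only [Prod.mk.injEq] at hco
    unfold nbr
    simp only [ne_eq]
    omega
  · intro h m hm hn
    apply h
    obtain ⟨m1, m2⟩ := m; obtain ⟨c1, c2⟩ := c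
    obtain ⟨h1, h2, h3, h4, h5⟩ := hn
    refine ⟨(m1, m2), hm, (c1 - m1, c2 - m2), ?_, ?_, ?_⟩
    · simp only [pvOffsets, List.mem_cons, List.not_mem_nil, or_false, Prod.mk.injEq]
      simp only [ne_eq] at h5
      omega
    · simp only at hc ⊢; omega
    · simp only [Prod.mk.injEq]; omega

-- ===== VERDICT (by name: the statement is the Claim_ definition above) =====
theorem brez_sosedov_spec : Claim_equal_brez_sosedov := by
  intro mine s v _
  unfold Spec_brez_sosedov brez_sosedov brez_sosedov_alt
  apply PySem.List.foldl_congr_mem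
  intro acc c hcmem
  have hc : 0 ≤ c.1 ∧ c.1 < s ∧ 0 ≤ c.2 ∧ c.2 < v := by
    obtain ⟨c1, c2⟩ := c
    simp only [vsa_polja, List.mem_flatMap, List.mem_map, PySem.List.mem_pyRange_one,
      Prod.mk.injEq] at hcmem
    obtain ⟨a, ha, b, hb, rfl, rfl⟩ := hcmem
    exact ⟨ha.1, ha.2, hb.1, hb.2⟩
  have hbr := bridge mine s v c hc
  by_cases h : c ∈ adjacentOf mine s v
  · rw [if_neg (by simpa [hbr]), if_pos h]
  · rw [if_pos (hbr.mpr h), if_neg h]
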